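-- pv_equiv track=rewrite | github.com/Facundo-Barriola/Parser_Lexer | automatas.py | afd_hasta
-- ===== SOURCE A (Python) =====
-- Estado_Final="Estado Final"
--
-- Estado_No_Final="Estado no final"
--
-- Estado_Trampa="Estado Trampa"
--
-- def afd_hasta(cadena):
--     estado_actual=0
--     estados_finales=[5]
--     for c in cadena:
--         if (c=="h" and estado_actual==0):
--             estado_actual=1
--         elif (c=="a" and estado_actual==1):
--             estado_actual=2
--         elif (c=="s" and estado_actual==2):
--             estado_actual=3
--         elif (c=="t" and estado_actual==3):
--             estado_actual=4
--         elif (c=="a" and estado_actual==4):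
--             estado_actual=5
--         else:
--             estado_actual=-1
--             break
--     if estado_actual == -1:
--         return (Estado_Trampa)
--     elif estado_actual in estados_finales:
--         return (Estado_Final)
--     else:
--         return (Estado_No_Final)
-- ===== SOURCE B (Python) =====
-- Estado_Final="Estado Final"
--
-- Estado_No_Final="Estado no final"
--
-- Estado_Trampa="Estado Trampa"
--
-- def afd_hasta(cadena):
--     if cadena == "hasta":
--         return Estado_Final
--     if "hasta".startswith(cadena):
--         return Estado_No_Final
--     return Estado_Trampa
-- ===== Notes on version B (the rewrite author's own statement) =====
-- stated objective: simpler
-- what changed: Replaces the explicit per-character DFA loop with state variable by three branches over string-prefix comparison against the constant target string.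
import Mathlib
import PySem

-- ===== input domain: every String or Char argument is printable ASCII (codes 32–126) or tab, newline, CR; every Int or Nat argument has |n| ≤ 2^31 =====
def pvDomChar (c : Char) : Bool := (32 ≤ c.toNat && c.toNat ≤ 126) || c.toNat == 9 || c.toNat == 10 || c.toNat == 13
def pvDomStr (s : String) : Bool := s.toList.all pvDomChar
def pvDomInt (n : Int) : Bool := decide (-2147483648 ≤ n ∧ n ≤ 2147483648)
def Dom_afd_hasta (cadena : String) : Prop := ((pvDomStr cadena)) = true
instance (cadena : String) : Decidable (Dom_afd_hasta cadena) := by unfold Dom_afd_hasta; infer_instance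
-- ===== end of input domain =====

-- B replaces A's per-character DFA loop by three branches over prefix comparison with "hasta" (simpler).

-- ===== PORT A =====
-- the for-loop with early break: state evolves per character, -1 on mismatch stops the loop
def afdRun : Int → List Char → Int
  | s, [] => s
  | s, c :: rest =>
    if c = 'h' ∧ s = 0 then afdRun 1 rest
    else if c = 'a' ∧ s = 1 then afdRun 2 rest
    else if c = 's' ∧ s = 2 then afdRun 3 rest
    else if c = 't' ∧ s = 3 then afdRun 4 rest
    else if c = 'a' ∧ s = 4 then afdRun 5 rest
    else (-1)

def afd_hasta (cadena : String) : String :=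
  let estado_actual := afdRun 0 cadena.toList
  if estado_actual = -1 then "Estado Trampa"
  else if estado_actual ∈ ([5] : List Int) then "Estado Final"
  else "Estado no final"

-- ===== PORT B =====
def afd_hasta_alt (cadena : String) : String :=
  if cadena = "hasta" then "Estado Final"
  else if PySem.Str.startswith "hasta" cadena then "Estado no final"
  else "Estado Trampa"

-- ===== PRECONDITION & SPEC =====
def Spec_afd_hasta (cadena : String) (out : String) : Prop := out = afd_hasta_alt cadena
instance (cadena : String) (out : String) : Decidable (Spec_afd_hasta cadena out) := by unfold Spec_afd_hasta; infer_instance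

-- ===== CLAIM (what is proved, stated in full; the proofs are below) =====
def Claim_equal_afd_hasta : Prop := ∀ (cadena : String), Dom_afd_hasta cadena → Spec_afd_hasta cadena (afd_hasta cadena)

-- ===== LEMMAS AND PROOFS =====

-- characterisation of the DFA run from any reachable state i ≤ 5
theorem afdRun_char (l : List Char) : ∀ (i : Nat), i ≤ 5 →
    afdRun (i : Int) l = if l <+: (['h','a','s','t','a'].drop i) then ((i + l.length : Nat) : Int) else -1 := by
  induction l with
  | nil =>
    intro i _
    simp [afdRun]
  | cons c rest ih =>
    intro i hi
    have i1 := ih 1 (by omega); have i2 := ih 2 (by omega); have i3 := ih 3 (by omega)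
    have i4 := ih 4 (by omega); have i5 := ih 5 (by omega)
    norm_num at i1 i2 i3 i4 i5
    interval_cases i <;>
      simp only [afdRun, List.cons_prefix_cons, List.drop, Nat.cast_ofNat, Nat.cast_one, Nat.cast_zero] <;>
      split_ifs with h1 h2 <;> simp_all <;> omega

theorem afdRun_zero (l : List Char) :
    afdRun 0 l = if l <+: ['h','a','s','t','a'] then (l.length : Int) else -1 := by
  simpa using afdRun_char l 0 (by omega)

theorem hasta_toList : "hasta".toList = ['h','a','s','t','a'] := rfl

-- ===== VERDICT (by name: the statement is the Claim_ definition above) =====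
theorem afd_hasta_spec : Claim_equal_afd_hasta := by
  intro cadena _
  unfold Spec_afd_hasta afd_hasta afd_hasta_alt
  rw [afdRun_zero, PySem.Str.startswith_eq, hasta_toList]
  by_cases hp : cadena.toList <+: ['h','a','s','t','a']
  · have hsw : PySem.Chars.startswith ['h','a','s','t','a'] cadena.toList = true :=
      (PySem.Chars.startswith_iff _ _).mpr hp
    have hlen : cadena.toList.length ≤ 5 := by simpa using hp.length_le
    by_cases h5 : cadena.toList.length = 5
    · have heq : cadena = "hasta" := by
        have h1 : cadena.toList = ['h','a','s','t','a'] :=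
          List.prefix_iff_eq_take.mp hp |>.trans (by rw [h5]; rfl)
        have := congrArg String.ofList h1
        simpa using this
      simp [heq]
    · have hne : cadena ≠ "hasta" := by
        intro h; subst h; simp at h5
      have hn1 : (cadena.toList.length : Int) ≠ -1 := by omega
      have hn5 : (cadena.toList.length : Int) ≠ 5 := by
        intro h; exact h5 (by exact_mod_cast h)
      simp [hp, hne, hsw, hn1, hn5, ← String.length_toList]
  · have hne : cadena ≠ "hasta" := by
      intro h; subst h; simp at hp
    have hsw : PySem.Chars.startswith ['h','a','s','t','a'] cadena.toList = false := by
      rw [Bool.eq_false_iff]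
      intro h
      exact hp ((PySem.Chars.startswith_iff _ _).mp h)
    simp [hp, hne, hsw]
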